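-- pv_equiv track=rewrite | github.com/jens-markussen/ddc | 2026/FIBONACCI_CAESAR/crypto_fibocaesar/main_decrypt.py | fib_caesar_decrypt
-- ===== SOURCE A (Python) =====
-- import string
--
-- alphabet = 'abcdefghijklmnopqrstuvwxyz'
--
-- def fib_caesar_decrypt(a, b, ciphertext):
--     out = []
--     for c in ciphertext:
--         if c in string.whitespace:
--             out.append(c)
--             continue
--         k = a % len(alphabet)
--         a, b = b, a + b
--         out.append(alphabet[(alphabet.index(c) - k) % len(alphabet)])
--     return "".join(out)
-- ===== SOURCE B (Python) =====
-- import string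
--
-- alphabet = 'abcdefghijklmnopqrstuvwxyz'
--
-- def fib_caesar_decrypt(a, b, ciphertext):
--     # pass 1: generate the Fibonacci key stream (one key per non-whitespace char)
--     keys = []
--     for c in ciphertext:
--         if c not in string.whitespace:
--             keys.append(a % 26)
--             a, b = b, a + b
--     # pass 2: decode arithmetically via char codes
--     out = []
--     i = 0
--     for c in ciphertext:
--         if c in string.whitespace:
--             out.append(c)
--         else:
--             out.append(chr((ord(c) - 97 - keys[i]) % 26 + 97))
--             i += 1
--     return "".join(out)
-- ===== Notes on version B (the rewrite author's own statement) =====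
-- stated objective: alternative
-- what changed: A decodes in a single loop that interleaves Fibonacci key generation with alphabet.index table lookups; B makes two separate passes (first building the whole key stream, then decoding) and decodes arithmetically with ord/chr instead of alphabet.index/alphabet[...].
import Mathlib
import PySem

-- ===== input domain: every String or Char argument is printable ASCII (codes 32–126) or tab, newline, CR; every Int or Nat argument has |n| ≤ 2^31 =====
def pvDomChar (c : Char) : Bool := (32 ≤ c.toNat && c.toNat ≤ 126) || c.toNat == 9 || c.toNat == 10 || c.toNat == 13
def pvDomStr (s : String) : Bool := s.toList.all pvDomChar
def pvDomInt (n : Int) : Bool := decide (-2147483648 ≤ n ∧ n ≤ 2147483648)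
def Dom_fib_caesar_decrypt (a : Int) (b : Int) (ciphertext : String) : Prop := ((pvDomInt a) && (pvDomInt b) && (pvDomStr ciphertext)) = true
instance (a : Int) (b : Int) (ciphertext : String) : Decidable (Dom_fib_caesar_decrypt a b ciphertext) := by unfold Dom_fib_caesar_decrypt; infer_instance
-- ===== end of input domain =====

-- B separates Fibonacci key-stream generation from decoding into two passes and decodes arithmetically via char codes (objective: alternative, same cost).
set_option maxRecDepth 10000


-- ===== PORT A =====
-- alphabet = 'abcdefghijklmnopqrstuvwxyz'
def pvAlph : List Char := ['a','b','c','d','e','f','g','h','i','j','k','l','m','n','o','p','q','r','s','t','u','v','w','x','y','z']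
-- string.whitespace = ' \t\n\r\x0b\x0c'
def pvWs : List Char := [' ', '\t', '\n', '\r', '\x0b', Char.ofNat 12]

-- A's single loop: state (a, b), append-as-cons
def pvGoA (a b : Int) : List Char → List Char
  | [] => []
  | c :: rest =>
    if c ∈ pvWs then c :: pvGoA a b rest
    else
      let k := a % 26
      -- alphabet[(alphabet.index(c) - k) % 26]; idxOf = 26 when c is absent (A raises ValueError there, excluded by Pre_)
      pvAlph.getD ((((pvAlph.idxOf c : Int) - k) % 26).toNat) 'a' :: pvGoA b (a + b) rest

def fib_caesar_decrypt (a : Int) (b : Int) (ciphertext : String) : String :=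
  String.mk (pvGoA a b ciphertext.toList)

-- ===== PORT B =====
-- pass 1 of B: the Fibonacci key stream, one key per non-whitespace char
def pvKeysB (a b : Int) : List Char → List Int
  | [] => []
  | c :: rest => if c ∉ pvWs then (a % 26) :: pvKeysB b (a + b) rest else pvKeysB a b rest

-- pass 2 of B: decode via char codes, consuming the key stream (i-th key for the i-th non-whitespace char)
def pvGoB : List Int → List Char → List Char
  | _, [] => []
  | ks, c :: rest =>
    if c ∈ pvWs then c :: pvGoB ks rest
    else
      match ks with
      | [] => []  -- keys[i] IndexError: unreachable when ks was built from the same string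
      | k :: ks' => Char.ofNat ((((c.toNat : Int) - 97 - k) % 26 + 97).toNat) :: pvGoB ks' rest

def fib_caesar_decrypt_alt (a : Int) (b : Int) (ciphertext : String) : String :=
  String.mk (pvGoB (pvKeysB a b ciphertext.toList) ciphertext.toList)

-- ===== PRECONDITION & SPEC =====
-- Pre_ excludes exactly the inputs where A raises ValueError: a non-whitespace character not in the lowercase alphabet.
def Pre_fib_caesar_decrypt (a : Int) (b : Int) (ciphertext : String) : Prop :=
  (ciphertext.toList.all (fun c => pvAlph.contains c || pvWs.contains c)) = true
instance (a : Int) (b : Int) (ciphertext : String) : Decidable (Pre_fib_caesar_decrypt a b ciphertext) := by unfold Pre_fib_caesar_decrypt; infer_instance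

def pvWitness_fib_caesar_decrypt : Int × Int × String := (1, 1, "khoor zruog")

def Spec_fib_caesar_decrypt (a : Int) (b : Int) (ciphertext : String) (out : String) : Prop := out = fib_caesar_decrypt_alt a b ciphertext
instance (a : Int) (b : Int) (ciphertext : String) (out : String) : Decidable (Spec_fib_caesar_decrypt a b ciphertext out) := by unfold Spec_fib_caesar_decrypt; infer_instance

-- ===== CLAIM (what is proved, stated in full; the proofs are below) =====
def Claim_equal_fib_caesar_decrypt : Prop := ∀ (a : Int) (b : Int) (ciphertext : String), Dom_fib_caesar_decrypt a b ciphertext → Pre_fib_caesar_decrypt a b ciphertext → Spec_fib_caesar_decrypt a b ciphertext (fib_caesar_decrypt a b ciphertext)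
-- ===== LEMMAS AND PROOFS =====

-- A's table lookup, for an index below 26
theorem pvGetD_eq : ∀ m ∈ List.range 26, pvAlph.getD m 'a' = Char.ofNat (97 + m) := by decide

-- A's alphabet.index, for an alphabet letter
theorem pvIdx_eq : ∀ c ∈ pvAlph, pvAlph.idxOf c = c.toNat - 97 ∧ 97 ≤ c.toNat := by
  intro c hc; fin_cases hc <;> exact ⟨rfl, by decide⟩

-- per-character agreement of the two decoders, for an alphabet letter and a key residue in [0, 26)
theorem pvCharEq (c : Char) (hc : c ∈ pvAlph) (kn : Nat) (hk : kn < 26) :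
    pvAlph.getD ((((pvAlph.idxOf c : Int) - (kn : Int)) % 26).toNat) 'a'
      = Char.ofNat ((((c.toNat : Int) - 97 - (kn : Int)) % 26 + 97).toNat) := by
  obtain ⟨hidx, h97⟩ := pvIdx_eq c hc
  have hx : ((pvAlph.idxOf c : Int) - (kn : Int)) = (c.toNat : Int) - 97 - (kn : Int) := by
    rw [hidx]; omega
  rw [hx]
  have h0 : (0:Int) ≤ ((c.toNat : Int) - 97 - (kn : Int)) % 26 :=
    Int.emod_nonneg _ (by norm_num)
  have h26 : ((c.toNat : Int) - 97 - (kn : Int)) % 26 < 26 :=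
    Int.emod_lt_of_pos _ (by norm_num)
  rw [pvGetD_eq _ (List.mem_range.mpr (by omega))]
  exact congrArg Char.ofNat (by omega)

-- the one-pass loop of A equals B's pass 2 run on B's pass-1 key stream
theorem pvGoEq (l : List Char) : ∀ a b : Int, (∀ c ∈ l, c ∈ pvAlph ∨ c ∈ pvWs) →
    pvGoA a b l = pvGoB (pvKeysB a b l) l := by
  induction l with
  | nil => intro a b _; rfl
  | cons c rest ih =>
    intro a b h
    by_cases hw : c ∈ pvWs
    · simp only [pvGoA, pvGoB, pvKeysB, if_pos hw, if_neg (not_not_intro hw)]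
      exact congrArg (c :: ·) (ih a b (fun x hx => h x (List.mem_cons_of_mem _ hx)))
    · have hc : c ∈ pvAlph := (h c (List.mem_cons_self ..)).resolve_right hw
      simp only [pvGoA, pvGoB, pvKeysB, if_neg hw, if_pos hw]
      have hk0 : (0:Int) ≤ a % 26 := Int.emod_nonneg a (by norm_num)
      have hk26 : a % 26 < 26 := Int.emod_lt_of_pos a (by norm_num)
      have hcast : ((a % 26).toNat : Int) = a % 26 := Int.toNat_of_nonneg hk0
      have hlt : (a % 26).toNat < 26 := by omega
      have hchar := pvCharEq c hc (a % 26).toNat hlt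
      rw [hcast] at hchar
      rw [hchar]
      exact congrArg _ (ih b (a + b) (fun x hx => h x (List.mem_cons_of_mem _ hx)))

-- ===== VERDICT (by name: the statement is the Claim_ definition above) =====
theorem fib_caesar_decrypt_spec : Claim_equal_fib_caesar_decrypt := by
  intro a b ciphertext _ hpre
  unfold Pre_fib_caesar_decrypt at hpre
  unfold Spec_fib_caesar_decrypt fib_caesar_decrypt fib_caesar_decrypt_alt
  refine congrArg String.mk (pvGoEq ciphertext.toList a b ?_)
  intro c hc
  have h := List.all_eq_true.mp hpre c hc
  simpa using h
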